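-- pv_equiv track=rewrite | github.com/Jasraj2904/Python-projects | Random Password Challenge.py | compare_guess
-- ===== SOURCE A (Python) =====
-- def compare_guess(secret, guess):
--     """
--     Returns (correct_pos, correct_char_wrong_pos).
--     - correct_pos: number of characters matching in exact position.
--     - correct_char_wrong_pos: number of characters present in secret but in wrong position.
--     """
--     # Correct positions
--     correct_pos = sum(s == g for s, g in zip(secret, guess))
--
--     # For counting characters present but wrong position:
--     # Count occurrences of each char in secret and guess, then subtract correctly positioned matches.
--     from collections import Counter
--     secret_counter = Counter(secret)
--     guess_counter = Counter(guess)
--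
--     # Count total correct characters disregarding position
--     total_correct_chars = sum((secret_counter & guess_counter).values())
--
--     correct_wrong_pos = total_correct_chars - correct_pos
--     return correct_pos, correct_wrong_pos
-- ===== SOURCE B (Python) =====
-- def compare_guess(secret, guess):
--     """
--     Returns (correct_pos, correct_char_wrong_pos).
--     Single pass over zip: count exact matches and collect the non-matching
--     characters; the tail of the longer string joins the leftovers; then
--     greedily match guess leftovers against a count table of secret leftovers.
--     """
--     correct_pos = 0
--     leftover_secret = []
--     leftover_guess = []
--     for s, g in zip(secret, guess):
--         if s == g:
--             correct_pos += 1
--         else: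
--             leftover_secret.append(s)
--             leftover_guess.append(g)
--     n = min(len(secret), len(guess))
--     leftover_secret.extend(secret[n:])
--     leftover_guess.extend(guess[n:])
--     counts = {}
--     for ch in leftover_secret:
--         counts[ch] = counts.get(ch, 0) + 1
--     misplaced = 0
--     for ch in leftover_guess:
--         if counts.get(ch, 0) > 0:
--             counts[ch] = counts[ch] - 1
--             misplaced += 1
--     return correct_pos, misplaced
-- ===== Notes on version B (the rewrite author's own statement) =====
-- stated objective: alternative
-- what changed: Replaces the two-Counter multiset-intersection subtraction with a single pass over zip(secret,guess) that counts exact matches and collects only the non-matching leftover characters (plus the longer string's tail), then greedily consumes a count table of secret leftovers while scanning guess leftovers.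
import Mathlib
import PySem

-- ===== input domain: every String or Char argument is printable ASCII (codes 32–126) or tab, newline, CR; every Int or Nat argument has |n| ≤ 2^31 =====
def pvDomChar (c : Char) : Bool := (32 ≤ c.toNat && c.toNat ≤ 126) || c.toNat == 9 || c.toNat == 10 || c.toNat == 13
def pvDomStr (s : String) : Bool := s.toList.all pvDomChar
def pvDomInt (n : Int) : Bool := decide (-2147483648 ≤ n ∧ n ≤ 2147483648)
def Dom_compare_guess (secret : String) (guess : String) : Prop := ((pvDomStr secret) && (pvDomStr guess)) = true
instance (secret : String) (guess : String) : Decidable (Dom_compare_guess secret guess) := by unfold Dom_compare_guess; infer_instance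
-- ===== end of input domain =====

-- B replaces A's two-Counter multiset-intersection subtraction by one zip pass collecting only unmatched leftovers plus a greedy scan over a count table (alternative decomposition, same results).

-- ===== PORT A =====
-- loop body of A's generator sum over zip(secret, guess)
def stepA (a : Int) (p : Char × Char) : Int := a + (if p.1 = p.2 then 1 else 0)

-- summand of sum((secret_counter & guess_counter).values()): Counter '&' keeps keys of the
-- left counter whose min with the right count is positive, value = that min
def stepT (gc : PySem.Dict Char Int) (a : Int) (p : Char × Int) : Int :=
  let m := min p.2 (gc.getD p.1 0)
  if 0 < m then a + m else a

def compare_guess (secret : String) (guess : String) : Int × Int :=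
  -- correct_pos = sum(s == g for s, g in zip(secret, guess))
  let correct_pos : Int := (List.zip secret.toList guess.toList).foldl stepA 0
  -- secret_counter = Counter(secret); guess_counter = Counter(guess)
  let secret_counter := PySem.Dict.counter secret.toList
  let guess_counter := PySem.Dict.counter guess.toList
  let total_correct_chars : Int := secret_counter.items.foldl (stepT guess_counter) 0
  (correct_pos, total_correct_chars - correct_pos)

-- ===== PORT B =====
-- loop body of B's single pass over zip(secret, guess): (correct so far, secret leftovers, guess leftovers)
def stepB (st : Int × List Char × List Char) (p : Char × Char) : Int × List Char × List Char :=
  if p.1 = p.2 then (st.1 + 1, st.2.1, st.2.2) else (st.1, st.2.1 ++ [p.1], st.2.2 ++ [p.2])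

-- loop body of B's greedy scan over the count table: counts.get(ch, 0) > 0 guards the
-- decrement, so counts[ch] (key present) is exactly getD; counts[ch] -= 1 = insert
def stepG (ac : PySem.Dict Char Int × Int) (ch : Char) : PySem.Dict Char Int × Int :=
  if 0 < ac.1.getD ch 0 then (ac.1.insert ch (ac.1.getD ch 0 - 1), ac.2 + 1) else ac

def compare_guess_alt (secret : String) (guess : String) : Int × Int :=
  let s := secret.toList
  let g := guess.toList
  let st := (List.zip s g).foldl stepB (0, [], [])
  let n := min s.length g.length
  -- secret[n:] / guess[n:] with 0 ≤ n ≤ length: exactly List.drop n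
  let leftover_secret := st.2.1 ++ s.drop n
  let leftover_guess := st.2.2 ++ g.drop n
  -- counts = {}; for ch in leftover_secret: counts[ch] = counts.get(ch, 0) + 1
  let counts := leftover_secret.foldl (fun d ch => d.insert ch (d.getD ch 0 + 1)) PySem.Dict.empty
  let fin := leftover_guess.foldl stepG (counts, 0)
  (st.1, fin.2)

-- ===== PRECONDITION & SPEC =====
def Spec_compare_guess (secret : String) (guess : String) (out : Int × Int) : Prop := out = compare_guess_alt secret guess
instance (secret : String) (guess : String) (out : Int × Int) : Decidable (Spec_compare_guess secret guess out) := by unfold Spec_compare_guess; infer_instance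

-- ===== CLAIM (what is proved, stated in full; the proofs are below) =====
def Claim_equal_compare_guess : Prop := ∀ (secret : String) (guess : String), Dom_compare_guess secret guess → Spec_compare_guess secret guess (compare_guess secret guess)

-- ===== LEMMAS AND PROOFS =====

-- number of positions where the two lists agree
def corrZ : List Char → List Char → Int
  | a :: s, b :: g => (if a = b then 1 else 0) + corrZ s g
  | _, _ => 0

-- multiset of matched characters
def msetZ : List Char → List Char → Multiset Char
  | a :: s, b :: g => if a = b then a ::ₘ msetZ s g else msetZ s g
  | _, _ => 0

-- unmatched secret characters within the zipped prefix
def lremZ : List Char → List Char → List Char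
  | a :: s, b :: g => if a = b then lremZ s g else a :: lremZ s g
  | _, _ => []

-- unmatched guess characters within the zipped prefix
def gremZ : List Char → List Char → List Char
  | a :: s, b :: g => if a = b then gremZ s g else b :: gremZ s g
  | _, _ => []

theorem corrZ_eq_card_msetZ : ∀ s g : List Char, corrZ s g = (Multiset.card (msetZ s g) : Int)
  | a :: s, b :: g => by
    have := corrZ_eq_card_msetZ s g
    by_cases h : a = b
    · simp [corrZ, msetZ, h, this]; ring
    · simp [corrZ, msetZ, h, this]
  | [], _ => by simp [corrZ, msetZ]
  | _ :: _, [] => by simp [corrZ, msetZ]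

theorem zip_fold_corrZ : ∀ (s g : List Char) (k : Int),
    (List.zip s g).foldl stepA k = k + corrZ s g
  | a :: s, b :: g, k => by
    rw [List.zip_cons_cons, List.foldl_cons]
    by_cases h : a = b
    · rw [show stepA k (a, b) = k + 1 from by simp [stepA, h]]
      rw [zip_fold_corrZ s g (k + 1)]
      simp only [corrZ, if_pos h]
      ring
    · rw [show stepA k (a, b) = k from by simp [stepA, h]]
      rw [zip_fold_corrZ s g k]
      simp only [corrZ, if_neg h]
      ring
  | [], g, k => by simp [corrZ]
  | _ :: _, [], k => by simp [corrZ]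

theorem zip_fold_state : ∀ (s g : List Char) (k : Int) (A B : List Char),
    (List.zip s g).foldl stepB (k, A, B)
      = (k + corrZ s g, A ++ lremZ s g, B ++ gremZ s g)
  | a :: s, b :: g, k, A, B => by
    rw [List.zip_cons_cons, List.foldl_cons]
    by_cases h : a = b
    · rw [show stepB (k, A, B) (a, b) = (k + 1, A, B) from by simp [stepB, h]]
      rw [zip_fold_state s g (k + 1) A B]
      simp only [corrZ, lremZ, gremZ, if_pos h, Prod.mk.injEq]
      refine ⟨by ring, ?_⟩
      simp
    · rw [show stepB (k, A, B) (a, b) = (k, A ++ [a], B ++ [b]) from by simp [stepB, h]]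
      rw [zip_fold_state s g k (A ++ [a]) (B ++ [b])]
      simp only [corrZ, lremZ, gremZ, if_neg h, Prod.mk.injEq]
      refine ⟨by ring, ?_⟩
      simp
  | [], g, k, A, B => by simp [corrZ, lremZ, gremZ]
  | _ :: _, [], k, A, B => by simp [corrZ, lremZ, gremZ]

-- decomposition of the secret string into matched + leftover + tail
theorem secret_decomp : ∀ s g : List Char,
    (↑s : Multiset Char) = msetZ s g + ↑(lremZ s g) + ↑(s.drop (min s.length g.length))
  | a :: s, b :: g => by
    have ih := secret_decomp s g
    have hmin : min (a :: s).length ((b :: g)).length = (min s.length g.length) + 1 := by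
      simp [Nat.succ_min_succ]
    rw [hmin]
    by_cases h : a = b
    · simp only [msetZ, lremZ, List.drop_succ_cons, if_pos h]
      calc (↑(a :: s) : Multiset Char) = a ::ₘ ↑s := by rw [← Multiset.cons_coe]
        _ = _ := by rw [ih]; simp [Multiset.cons_add]
    · simp only [msetZ, lremZ, List.drop_succ_cons, if_neg h]
      calc (↑(a :: s) : Multiset Char) = a ::ₘ ↑s := by rw [← Multiset.cons_coe]
        _ = _ := by
          rw [ih]
          simp only [← Multiset.cons_coe, ← Multiset.singleton_add]
          abel
  | [], g => by simp [msetZ, lremZ]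
  | a :: s, [] => by simp [msetZ, lremZ]

theorem guess_decomp : ∀ s g : List Char,
    (↑g : Multiset Char) = msetZ s g + ↑(gremZ s g) + ↑(g.drop (min s.length g.length))
  | a :: s, b :: g => by
    have ih := guess_decomp s g
    have hmin : min (a :: s).length ((b :: g)).length = (min s.length g.length) + 1 := by
      simp [Nat.succ_min_succ]
    rw [hmin]
    by_cases h : a = b
    · subst h
      simp only [msetZ, gremZ, List.drop_succ_cons]
      calc (↑(a :: g) : Multiset Char) = a ::ₘ ↑g := by rw [← Multiset.cons_coe]
        _ = _ := by rw [ih]; simp [Multiset.cons_add]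
    · simp only [msetZ, gremZ, List.drop_succ_cons, if_neg h]
      calc (↑(b :: g) : Multiset Char) = b ::ₘ ↑g := by rw [← Multiset.cons_coe]
        _ = _ := by
          rw [ih]
          simp only [← Multiset.cons_coe, ← Multiset.singleton_add]
          abel
  | [], g => by simp [msetZ, gremZ]
  | a :: s, [] => by simp [msetZ, gremZ]

-- intersection distributes over a common added part
theorem inter_add_common (m u v : Multiset Char) : (m + u) ∩ (m + v) = m + u ∩ v := by
  ext a
  simp only [Multiset.count_inter, Multiset.count_add]
  omega

-- greedy consumption from a count table counts the multiset intersection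
theorem greedy_card : ∀ (G : List Char) (d : PySem.Dict Char Int) (L : List Char) (k : Int),
    (∀ c, d.getD c 0 = (L.count c : Int)) →
    (G.foldl stepG (d, k)).2 = k + (Multiset.card ((↑G : Multiset Char) ∩ ↑L) : Int)
  | [], d, L, k, h => by simp
  | x :: G, d, L, k, h => by
    rw [List.foldl_cons]
    by_cases hx : x ∈ L
    · have hc : 0 < d.getD x 0 := by
        rw [h x]
        exact_mod_cast List.count_pos_iff.mpr hx
      have hx' : x ∈ (↑L : Multiset Char) := by simpa using hx
      rw [show ((↑(x :: G) : Multiset Char) ∩ ↑L)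
            = x ::ₘ ((↑G : Multiset Char) ∩ Multiset.erase (↑L : Multiset Char) x) by
            simpa using Multiset.cons_inter_of_pos (↑G : Multiset Char) hx']
      rw [show stepG (d, k) x = (d.insert x (d.getD x 0 - 1), k + 1) from by simp [stepG, hc]]
      have h' : ∀ c, (d.insert x (d.getD x 0 - 1)).getD c 0 = ((L.erase x).count c : Int) := by
        intro c
        rw [PySem.Dict.getD_insert]
        by_cases hcx : c = x
        · subst hcx
          rw [if_pos rfl, h c, List.count_erase_self]
          have h1 : 0 < L.count c := List.count_pos_iff.mpr hx
          omega
        · rw [if_neg hcx, h c, List.count_erase_of_ne hcx]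
      rw [greedy_card G _ (L.erase x) (k + 1) h']
      rw [show ((↑(L.erase x) : Multiset Char)) = Multiset.erase (↑L : Multiset Char) x from
            (Multiset.coe_erase L x).symm]
      rw [Multiset.card_cons]
      push_cast
      ring
    · have hc : ¬ 0 < d.getD x 0 := by
        rw [h x]
        have : L.count x = 0 := List.count_eq_zero.mpr hx
        omega
      have hx' : x ∉ (↑L : Multiset Char) := by simpa using hx
      rw [show ((↑(x :: G) : Multiset Char) ∩ ↑L) = ((↑G : Multiset Char) ∩ ↑L) by
            simpa using Multiset.cons_inter_of_neg (↑G : Multiset Char) hx']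
      rw [show stepG (d, k) x = (d, k) from by simp [stepG, hc]]
      exact greedy_card G d L k h

-- A's fold over the secret counter's items equals the multiset-intersection size
theorem counter_fold_eq_card (s g : List Char) :
    (PySem.Dict.counter s).items.foldl (stepT (PySem.Dict.counter g)) 0
      = (Multiset.card ((↑s : Multiset Char) ∩ ↑g) : Int) := by
  rw [PySem.Dict.items_counter]
  -- the guarded step is plain addition, since both counts are nonnegative
  have hstep : ∀ (a : Int) (k : Char),
      stepT (PySem.Dict.counter g) a (k, (s.count k : Int))
        = a + ((min (s.count k) (g.count k) : ℕ) : Int) := by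
    intro a k
    simp only [stepT, PySem.Dict.getD_counter]
    push_cast
    split_ifs with h <;> omega
  -- fold of (a + f k) over a list is the sum of f
  have hfold : ∀ (l : List Char) (k0 : Int),
      (l.map (fun k => (k, (s.count k : Int)))).foldl (stepT (PySem.Dict.counter g)) k0
      = k0 + ((l.map (fun k => ((min (s.count k) (g.count k) : ℕ) : Int))).sum) := by
    intro l
    induction l with
    | nil => simp
    | cons x xs ih =>
      intro k0
      rw [List.map_cons, List.foldl_cons, hstep, List.map_cons, List.sum_cons, ih]
      ring
  rw [hfold, zero_add]
  -- sum over the deduplicated secret chars = Finset sum over s.toFinset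
  have hnd : (PySem.Set.ofList s).Nodup := PySem.Set.nodup_ofList s
  have htf : (PySem.Set.ofList s).toFinset = s.toFinset := by
    ext a; simp [PySem.Set.mem_ofList]
  have hsum := List.sum_toFinset (l := PySem.Set.ofList s)
      (f := fun k => ((min (s.count k) (g.count k) : ℕ) : Int)) hnd
  rw [← hsum, htf]
  -- now a pure counting identity
  have hcard : (Multiset.card ((↑s : Multiset Char) ∩ ↑g))
      = ∑ a ∈ s.toFinset, min (s.count a) (g.count a) := by
    have h1 : ((↑s : Multiset Char) ∩ ↑g).toFinset ⊆ s.toFinset := by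
      intro a ha
      simp only [Multiset.mem_toFinset, Multiset.mem_inter, Multiset.mem_coe] at ha
      simpa using ha.1
    calc Multiset.card ((↑s : Multiset Char) ∩ ↑g)
        = ∑ a ∈ ((↑s : Multiset Char) ∩ ↑g).toFinset, ((↑s : Multiset Char) ∩ ↑g).count a :=
          (Multiset.toFinset_sum_count_eq _).symm
      _ = ∑ a ∈ s.toFinset, ((↑s : Multiset Char) ∩ ↑g).count a := by
          refine Finset.sum_subset h1 ?_
          intro a _ ha
          simp only [Multiset.mem_toFinset] at ha
          exact Multiset.count_eq_zero_of_notMem ha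
      _ = ∑ a ∈ s.toFinset, min (s.count a) (g.count a) := by
          refine Finset.sum_congr rfl ?_
          intro a _
          simp only [Multiset.count_inter, Multiset.coe_count]
  rw [hcard]
  push_cast
  rfl

-- ===== VERDICT (by name: the statement is the Claim_ definition above) =====
theorem compare_guess_spec : Claim_equal_compare_guess := by
  intro secret guess _
  unfold Spec_compare_guess
  have hA : compare_guess secret guess =
      ((List.zip secret.toList guess.toList).foldl stepA 0,
       (PySem.Dict.counter secret.toList).items.foldl (stepT (PySem.Dict.counter guess.toList)) 0
         - (List.zip secret.toList guess.toList).foldl stepA 0) := rfl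
  have hB : compare_guess_alt secret guess =
      (((List.zip secret.toList guess.toList).foldl stepB (0, [], [])).1,
       (((((List.zip secret.toList guess.toList).foldl stepB (0, [], [])).2.2
           ++ guess.toList.drop (min secret.toList.length guess.toList.length))).foldl stepG
         ((((List.zip secret.toList guess.toList).foldl stepB (0, [], [])).2.1
            ++ secret.toList.drop (min secret.toList.length guess.toList.length)).foldl
              (fun d ch => d.insert ch (d.getD ch 0 + 1)) PySem.Dict.empty, 0)).2) := rfl
  set s := secret.toList
  set g := guess.toList
  rw [hA, hB, zip_fold_corrZ s g 0, zip_fold_state s g 0 [] [],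
      counter_fold_eq_card s g]
  simp only [zero_add, List.nil_append]
  rw [PySem.Dict.foldl_insert_getD_add_one_eq_counter]
  rw [greedy_card _ _ (lremZ s g ++ s.drop (min s.length g.length)) 0
        (fun c => PySem.Dict.getD_counter _ _)]
  rw [zero_add]
  refine Prod.ext rfl ?_
  -- remains: card(s ∩ g) - corr = card(leftoverG ∩ leftoverS)
  have hdec : ((↑s : Multiset Char) ∩ ↑g)
      = msetZ s g + (((lremZ s g : Multiset Char) + ((s.drop (min s.length g.length) : List Char) : Multiset Char))
          ∩ ((gremZ s g : Multiset Char) + ((g.drop (min s.length g.length) : List Char) : Multiset Char))) := by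
    conv_lhs => rw [secret_decomp s g, guess_decomp s g]
    rw [add_assoc, add_assoc, inter_add_common]
  have hcomm : ((↑(gremZ s g ++ g.drop (min s.length g.length)) : Multiset Char)
        ∩ ↑(lremZ s g ++ s.drop (min s.length g.length)))
      = (((lremZ s g : Multiset Char) + ((s.drop (min s.length g.length) : List Char) : Multiset Char))
          ∩ ((gremZ s g : Multiset Char) + ((g.drop (min s.length g.length) : List Char) : Multiset Char))) := by
    ext a
    simp only [Multiset.count_inter, Multiset.count_add, Multiset.coe_count, List.count_append]
    omega
  rw [hcomm, corrZ_eq_card_msetZ, hdec]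
  simp only [Multiset.card_add]
  push_cast
  ring
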